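-- pv_equiv track=rewrite | github.com/dmartzol/delaunay | delaunay/triangulation.py | filter_path_list
-- ===== SOURCE A (Python) =====
-- def filter_path_list(l):
--     """
--     Filtering list for repeated paths
--     """
--     new_list = []
--     for element in l:
--         inverted = element[::-1]
--         if element in new_list:
--             continue
--         elif inverted in new_list:
--             continue
--         else:
--             new_list.append(element)
--     return new_list
-- ===== SOURCE B (Python) =====
-- def filter_path_list(l):
--     """
--     Filtering list for repeated paths
--     """
--     result = []
--     remaining = l
--     while remaining:
--         head = remaining[0]
--         rev = head[::-1]
--         result.append(head)
--         remaining = [e for e in remaining[1:] if e != head and e != rev]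
--     return result
-- ===== Notes on version B (the rewrite author's own statement) =====
-- stated objective: alternative
-- what changed: Replaces A's single pass testing each path for membership in the growing result list by a nub-by-deletion scheme: repeatedly take the first remaining path, append it to the result, and delete every later occurrence of it and of its reverse from the remaining input, so no membership test against the result ever happens.
import Mathlib
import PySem

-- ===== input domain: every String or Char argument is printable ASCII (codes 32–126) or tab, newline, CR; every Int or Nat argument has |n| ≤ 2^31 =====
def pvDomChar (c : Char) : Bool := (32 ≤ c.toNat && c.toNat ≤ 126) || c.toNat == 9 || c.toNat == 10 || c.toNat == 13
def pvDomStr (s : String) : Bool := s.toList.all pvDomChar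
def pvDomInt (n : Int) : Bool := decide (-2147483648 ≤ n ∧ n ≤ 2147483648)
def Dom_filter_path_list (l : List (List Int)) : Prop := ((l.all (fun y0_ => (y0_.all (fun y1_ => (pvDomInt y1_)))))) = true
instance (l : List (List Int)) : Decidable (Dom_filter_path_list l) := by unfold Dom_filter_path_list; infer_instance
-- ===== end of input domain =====

-- B replaces A's membership tests against the growing result by nub-by-deletion:
-- take the first remaining path, emit it, delete it and its reverse from the rest (alternative, same cost).


-- ===== PORT A =====
def filter_path_list (l : List (List Int)) : List (List Int) :=
  l.foldl (fun new_list element =>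
    let inverted := element.reverse        -- element[::-1]
    if element ∈ new_list then new_list
    else if inverted ∈ new_list then new_list
    else new_list ++ [element]) []

-- ===== PORT B =====
-- the while loop: result/remaining are the two loop variables
def altLoop (result remaining : List (List Int)) : List (List Int) :=
  match remaining with
  | [] => result
  | head :: tail =>
    altLoop (result ++ [head])
      (tail.filter (fun e => !(e == head) && !(e == head.reverse)))
termination_by remaining.length
decreasing_by
  simpa using Nat.lt_succ_of_le (List.length_filter_le _ tail)

def filter_path_list_alt (l : List (List Int)) : List (List Int) :=
  altLoop [] l

-- ===== PRECONDITION & SPEC =====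
def Spec_filter_path_list (l : List (List Int)) (out : List (List Int)) : Prop := out = filter_path_list_alt l
instance (l : List (List Int)) (out : List (List Int)) : Decidable (Spec_filter_path_list l out) := by unfold Spec_filter_path_list; infer_instance

-- ===== CLAIM (what is proved, stated in full; the proofs are below) =====
def Claim_equal_filter_path_list : Prop := ∀ (l : List (List Int)), Dom_filter_path_list l → Spec_filter_path_list l (filter_path_list l)

-- ===== LEMMAS AND PROOFS =====

-- drop from l every path already in acc forwards or reversed
def removeSeen (acc l : List (List Int)) : List (List Int) :=
  l.filter (fun e => !(decide (e ∈ acc)) && !(decide (e.reverse ∈ acc)))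

theorem removeSeen_snoc (acc : List (List Int)) (h : List Int) (l : List (List Int)) :
    removeSeen (acc ++ [h]) l
      = (removeSeen acc l).filter (fun e => !(e == h) && !(e == h.reverse)) := by
  unfold removeSeen
  rw [List.filter_filter]
  apply List.filter_congr
  intro e _
  have hrev : e.reverse = h ↔ e = h.reverse := by
    constructor
    · intro he; rw [← he, List.reverse_reverse]
    · intro he; rw [he, List.reverse_reverse]
  by_cases h1 : e ∈ acc <;> by_cases h2 : e = h <;> by_cases h3 : e.reverse ∈ acc <;>
    by_cases h4 : e = h.reverse <;> simp [h1, h2, h3, h4, hrev]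

theorem loop_eq : ∀ (l acc : List (List Int)),
    l.foldl (fun new_list element =>
      let inverted := element.reverse
      if element ∈ new_list then new_list
      else if inverted ∈ new_list then new_list
      else new_list ++ [element]) acc
    = altLoop acc (removeSeen acc l) := by
  intro l
  induction l with
  | nil => intro acc; simp [removeSeen, altLoop]
  | cons e rest ih =>
    intro acc
    by_cases h1 : e ∈ acc
    · simp only [List.foldl_cons, if_pos h1]
      rw [ih acc]
      unfold removeSeen
      simp [h1]
    · by_cases h2 : e.reverse ∈ acc
      · simp only [List.foldl_cons, if_neg h1, if_pos h2]
        rw [ih acc]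
        unfold removeSeen
        simp [h1, h2]
      · simp only [List.foldl_cons, if_neg h1, if_neg h2]
        rw [ih (acc ++ [e])]
        have hhead : removeSeen acc (e :: rest) = e :: removeSeen acc rest := by
          unfold removeSeen; simp [h1, h2]
        rw [hhead, altLoop, removeSeen_snoc]

-- ===== VERDICT (by name: the statement is the Claim_ definition above) =====
theorem filter_path_list_spec : Claim_equal_filter_path_list := by
  intro l _hdom
  unfold Spec_filter_path_list filter_path_list filter_path_list_alt
  rw [loop_eq l []]
  unfold removeSeen
  simp
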